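-- pv_equiv track=rewrite | github.com/malebuffy/Kobra-Max-Cobra-Kai-UI-and-Firmware | cura/CreateKobraThumbnail.py | _convertSnapshotToGcode
-- ===== SOURCE A (Python) =====
-- def _convertSnapshotToGcode(encoded_snapshot, chunk_size=480):
--     gcode = []
--
--     encoded_snapshot_length = len(encoded_snapshot)
--     gcode.append(";")
--     # compute the final size and length and add it to the gcode string
--     additional_size = 12 * ((len(encoded_snapshot) // chunk_size)+1) + chunk_size - (len(encoded_snapshot) % chunk_size)
--     final_size = encoded_snapshot_length + additional_size
--     gcode.append("; thumbnail kobra 150x120 {}".format(final_size))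
--
--     address = 0x8000
--     line_length = 78  # We subtract 2 to account for the semicolon and the newline character
--     chunks = []
--     current_line = "; "
--     n_additions = 0  # count the number of times the "5AA5F3..." string is added
--     for i in range(0, len(encoded_snapshot), chunk_size):
--         chunk = encoded_snapshot[i:i+chunk_size]
--         if len(chunk) < chunk_size:
--             chunk += '0' * (chunk_size - len(chunk))
--         chunk_comment = "5AA5F382{:04X}{}".format(address, chunk)
--         n_additions += 1  # increment the count
--         while len(chunk_comment) > 0:
--             remaining_space = line_length - len(current_line)
--             current_line += chunk_comment[:remaining_space]
--             chunk_comment = chunk_comment[remaining_space:]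
--             if len(current_line) == line_length:
--                 gcode.append(current_line)
--                 current_line = "; "
--         address += 0x78
--
--     if len(current_line) < line_length and len(current_line) > 1:
--         gcode.append(current_line)
--
--     gcode.append("; thumbnail end")
--     gcode.append(";")
--
--     return gcode
-- ===== SOURCE B (Python) =====
-- def _convertSnapshotToGcode(encoded_snapshot, chunk_size=480):
--     n = len(encoded_snapshot)
--     additional_size = 12 * ((n // chunk_size) + 1) + chunk_size - (n % chunk_size)
--     final_size = n + additional_size
--     parts = []
--     address = 0x8000
--     for i in range(0, n, chunk_size):
--         chunk = encoded_snapshot[i:i + chunk_size].ljust(chunk_size, '0')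
--         parts.append("5AA5F382{:04X}{}".format(address, chunk))
--         address += 0x78
--     payload = "".join(parts)
--     complete = len(payload) // 76
--     body = ["; " + payload[j * 76:(j + 1) * 76] for j in range(complete + 1)]
--     return [";", "; thumbnail kobra 150x120 {}".format(final_size)] + body + ["; thumbnail end", ";"]
-- ===== Notes on version B (the rewrite author's own statement) =====
-- stated objective: simpler
-- what changed: A wraps output lines with a stateful while-loop that repeatedly re-slices and concatenates the growing current_line across chunks; B joins all formatted chunk strings into one payload once and emits it as fixed 76-character slices by index arithmetic (always emitting the trailing slice, matching A's unconditional final line), avoiding A's repeated intermediate string copies.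
import Mathlib
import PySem

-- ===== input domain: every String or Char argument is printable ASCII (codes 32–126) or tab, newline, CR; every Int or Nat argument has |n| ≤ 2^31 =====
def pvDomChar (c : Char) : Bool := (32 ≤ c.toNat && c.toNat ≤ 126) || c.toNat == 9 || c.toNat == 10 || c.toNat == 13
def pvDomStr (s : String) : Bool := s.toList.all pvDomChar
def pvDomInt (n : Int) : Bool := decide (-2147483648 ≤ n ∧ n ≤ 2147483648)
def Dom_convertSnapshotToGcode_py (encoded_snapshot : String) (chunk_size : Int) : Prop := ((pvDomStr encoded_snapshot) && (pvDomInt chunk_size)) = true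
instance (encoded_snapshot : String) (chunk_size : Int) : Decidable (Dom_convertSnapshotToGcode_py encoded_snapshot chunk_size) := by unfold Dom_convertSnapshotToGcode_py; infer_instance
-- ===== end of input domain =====

-- B replaces A's stateful while-loop line wrapper by join-all-chunks-then-slice-by-76; return value only, no mutation.

-- ===== PORT A =====
-- shared formatting helper: "{:04X}" for a nonnegative integer (addresses here are always ≥ 0x8000), exact on that domain
def pvHexDigit (n : Nat) : Char := if n < 10 then Char.ofNat (48 + n) else Char.ofNat (55 + n)

def pvHexChars (n : Nat) : List Char :=
  if h : n = 0 then [] else pvHexChars (n / 16) ++ [pvHexDigit (n % 16)]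
termination_by n
decreasing_by exact Nat.div_lt_self (Nat.pos_of_ne_zero h) (by omega)

def pvHex4 (n : Nat) : List Char :=
  let d := if n = 0 then ['0'] else pvHexChars n
  List.replicate (4 - d.length) '0' ++ d

-- the inner 'while len(chunk_comment) > 0' loop of A: s = chunk_comment, cur = current_line;
-- returns (lines appended to gcode, final current_line).  The 'hd' guard only makes the
-- recursion total; it holds whenever len(cur) ≤ 77 (always true in A).
def pvWhileA (s cur : List Char) : List (List Char) × List Char :=
  if _hs : s = [] then ([], cur)
  else
    let t : Int := 78 - (cur.length : Int)        -- remaining_space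
    let cur' := cur ++ PySem.List.slice s none (some t)
    let s' := PySem.List.slice s (some t) none
    if hd : s'.length < s.length then
      if cur'.length = 78 then
        let r := pvWhileA s' [';', ' ']
        (cur' :: r.1, r.2)
      else pvWhileA s' cur'
    else ([], cur')
termination_by s.length
decreasing_by · exact hd
              · exact hd

-- body of A's for-loop: state = (gcode, current_line, address)
def pvStepA (l : List Char) (cs : Int) (st : List (List Char) × List Char × Int) (i : Int) :
    List (List Char) × List Char × Int :=
  let chunk := PySem.List.slice l (some i) (some (i + cs))
  let chunk := if (chunk.length : Int) < cs
               then chunk ++ List.replicate (cs - (chunk.length : Int)).toNat '0'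
               else chunk
  let chunk_comment := "5AA5F382".toList ++ pvHex4 st.2.2.toNat ++ chunk
  let r := pvWhileA chunk_comment st.2.1
  (st.1 ++ r.1, r.2, st.2.2 + 0x78)

def convertSnapshotToGcode_py (encoded_snapshot : String) (chunk_size : Int) : List String :=
  let l := encoded_snapshot.toList
  let n : Int := (l.length : Int)
  let additional_size : Int :=
    12 * (PySem.Int.floordiv n chunk_size + 1) + chunk_size - PySem.Int.mod n chunk_size
  let final_size : Int := n + additional_size
  let gcode0 : List (List Char) :=
    [[';'], "; thumbnail kobra 150x120 ".toList ++ PySem.Int.toChars final_size]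
  let st := (PySem.List.pyRange 0 n chunk_size).foldl (pvStepA l chunk_size)
              (gcode0, [';', ' '], 0x8000)
  let gcode := if st.2.1.length < 78 ∧ 1 < st.2.1.length then st.1 ++ [st.2.1] else st.1
  (gcode ++ ["; thumbnail end".toList, [';']]).map String.mk

-- ===== PORT B =====
-- body of B's for-loop: state = (parts, address); chunk.ljust(chunk_size, '0')
def pvStepB (l : List Char) (cs : Int) (st : List (List Char) × Int) (i : Int) :
    List (List Char) × Int :=
  let chunk := PySem.List.slice l (some i) (some (i + cs))
  let chunk := chunk ++ List.replicate (cs - (chunk.length : Int)).toNat '0'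
  (st.1 ++ ["5AA5F382".toList ++ pvHex4 st.2.toNat ++ chunk], st.2 + 0x78)

def convertSnapshotToGcode_py_alt (encoded_snapshot : String) (chunk_size : Int) : List String :=
  let l := encoded_snapshot.toList
  let n : Int := (l.length : Int)
  let additional_size : Int :=
    12 * (PySem.Int.floordiv n chunk_size + 1) + chunk_size - PySem.Int.mod n chunk_size
  let final_size : Int := n + additional_size
  let st := (PySem.List.pyRange 0 n chunk_size).foldl (pvStepB l chunk_size) ([], 0x8000)
  let payload := st.1.flatten                      -- "".join(parts)
  let complete := PySem.Int.floordiv (payload.length : Int) 76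
  let body := (PySem.List.pyRange 0 (complete + 1) 1).map
    (fun j => [';', ' '] ++ PySem.List.slice payload (some (j * 76)) (some ((j + 1) * 76)))
  ([[';'], "; thumbnail kobra 150x120 ".toList ++ PySem.Int.toChars final_size]
    ++ body ++ ["; thumbnail end".toList, [';']]).map String.mk

-- ===== PRECONDITION & SPEC =====
-- Python A raises ZeroDivisionError for chunk_size = 0 (len % 0); B raises there too.
def Pre_convertSnapshotToGcode_py (encoded_snapshot : String) (chunk_size : Int) : Prop :=
  chunk_size ≠ 0
instance (encoded_snapshot : String) (chunk_size : Int) : Decidable (Pre_convertSnapshotToGcode_py encoded_snapshot chunk_size) := by unfold Pre_convertSnapshotToGcode_py; infer_instance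

def pvWitness_convertSnapshotToGcode_py : String × Int := ("abcdef", 4)

def Spec_convertSnapshotToGcode_py (encoded_snapshot : String) (chunk_size : Int) (out : List String) : Prop := out = convertSnapshotToGcode_py_alt encoded_snapshot chunk_size
instance (encoded_snapshot : String) (chunk_size : Int) (out : List String) : Decidable (Spec_convertSnapshotToGcode_py encoded_snapshot chunk_size out) := by unfold Spec_convertSnapshotToGcode_py; infer_instance

-- ===== CLAIM (what is proved, stated in full; the proofs are below) =====
def Claim_equal_convertSnapshotToGcode_py : Prop := ∀ (encoded_snapshot : String) (chunk_size : Int), Dom_convertSnapshotToGcode_py encoded_snapshot chunk_size → Pre_convertSnapshotToGcode_py encoded_snapshot chunk_size → Spec_convertSnapshotToGcode_py encoded_snapshot chunk_size (convertSnapshotToGcode_py encoded_snapshot chunk_size)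

-- ===== LEMMAS AND PROOFS =====

-- split a char list into its full 76-char pieces and the (length < 76) remainder
def pvSplit76 (l : List Char) : List (List Char) × List Char :=
  if _h : l.length < 76 then ([], l)
  else ((l.take 76) :: (pvSplit76 (l.drop 76)).1, (pvSplit76 (l.drop 76)).2)
termination_by l.length
decreasing_by simp; omega

lemma pvSplit76_rem_lt (l : List Char) : (pvSplit76 l).2.length < 76 := by
  induction l using pvSplit76.induct with
  | case1 l h => rw [pvSplit76]; simp [h]
  | case2 l h ih => rw [pvSplit76]; simpa [h] using ih

lemma pvSplit76_append (l m : List Char) :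
    pvSplit76 (l ++ m) =
      ((pvSplit76 l).1 ++ (pvSplit76 ((pvSplit76 l).2 ++ m)).1,
       (pvSplit76 ((pvSplit76 l).2 ++ m)).2) := by
  induction l using pvSplit76.induct with
  | case1 l h =>
      conv_rhs => rw [pvSplit76]
      simp [h]
  | case2 l h ih =>
      have h2 : ¬ (l ++ m).length < 76 := by simp; omega
      have htake : (l ++ m).take 76 = l.take 76 := by
        rw [List.take_append]
        simp [Nat.sub_eq_zero_of_le (by omega : 76 ≤ l.length)]
      have hdrop : (l ++ m).drop 76 = l.drop 76 ++ m := by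
        rw [List.drop_append]
        simp [Nat.sub_eq_zero_of_le (by omega : 76 ≤ l.length)]
      conv_lhs => rw [pvSplit76]
      conv_rhs => rw [pvSplit76]
      simp only [h2, h, dite_false]
      rw [htake, hdrop, ih]
      simp

lemma pvWhileA_eq_aux (n : Nat) : ∀ (s c : List Char), s.length ≤ n → c.length < 76 →
    pvWhileA s (';' :: ' ' :: c) =
      ((pvSplit76 (c ++ s)).1.map (fun x => ';' :: ' ' :: x),
       ';' :: ' ' :: (pvSplit76 (c ++ s)).2) := by
  induction n with
  | zero =>
      intro s c hs h
      have hnil : s = [] := by cases s <;> simp_all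
      subst hnil
      rw [pvWhileA]
      conv_rhs => rw [pvSplit76]
      simp [h]
  | succ n ih =>
      intro s c hs h
      cases s with
      | nil =>
          rw [pvWhileA]
          conv_rhs => rw [pvSplit76]
          simp [h]
      | cons a s0 =>
      have hcl : (a :: s0).length = s0.length + 1 := rfl
      rw [pvWhileA]
      rw [dif_neg (by simp : ¬ (a :: s0) = [])]
      have hk : (78 : Int) - (((';' :: ' ' :: c).length : Nat) : Int) = ((76 - c.length : Nat) : Int) := by
        simp; omega
      simp only [hk, PySem.List.slice_to_natCast, PySem.List.slice_from_natCast]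
      have hdlt : ((a :: s0).drop (76 - c.length)).length < (a :: s0).length := by
        simp only [List.length_drop, List.length_cons]; omega
      rw [dif_pos hdlt]
      by_cases hbig : 76 - c.length ≤ (a :: s0).length
      · have hlen : ((';' :: ' ' :: c) ++ (a :: s0).take (76 - c.length)).length = 78 := by
          simp only [List.length_append, List.length_take, List.length_cons]
          omega
        rw [if_pos hlen]
        have ihr := ih ((a :: s0).drop (76 - c.length)) []
          (Nat.lt_succ_iff.mp (Nat.lt_of_lt_of_le hdlt hs)) (by simp)
        simp only [List.nil_append] at ihr
        have hsplit : pvSplit76 (c ++ a :: s0) =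
            ((c ++ (a :: s0).take (76 - c.length)) :: (pvSplit76 ((a :: s0).drop (76 - c.length))).1,
             (pvSplit76 ((a :: s0).drop (76 - c.length))).2) := by
          rw [pvSplit76]
          rw [dif_neg (by simp only [List.length_append, List.length_cons] at hbig ⊢ ; omega :
            ¬ (c ++ a :: s0).length < 76)]
          have ht : (c ++ a :: s0).take 76 = c ++ (a :: s0).take (76 - c.length) := by
            rw [List.take_append]
            simp [List.take_of_length_le (by omega : c.length ≤ 76)]
          have hd : (c ++ a :: s0).drop 76 = (a :: s0).drop (76 - c.length) := by
            rw [List.drop_append]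
            simp [List.drop_of_length_le (by omega : c.length ≤ 76)]
          rw [ht, hd]
        rw [hsplit, ihr]
        simp
      · push_neg at hbig
        have htk : (a :: s0).take (76 - c.length) = a :: s0 := List.take_of_length_le (by omega)
        have hdk : (a :: s0).drop (76 - c.length) = [] := List.drop_eq_nil_of_le (by omega)
        have hlen : ¬ ((';' :: ' ' :: c) ++ (a :: s0).take (76 - c.length)).length = 78 := by
          rw [htk]
          simp only [List.length_append, List.length_cons]
          simp only [List.length_cons] at hbig
          omega
        rw [if_neg hlen, hdk, htk]
        rw [pvWhileA]
        rw [dif_pos rfl]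
        conv_rhs => rw [pvSplit76]
        rw [dif_pos (by simp only [List.length_append, List.length_cons]
                        simp only [List.length_cons] at hbig
                        omega : (c ++ a :: s0).length < 76)]
        simp

lemma pvWhileA_eq (s c : List Char) (h : c.length < 76) :
    pvWhileA s (';' :: ' ' :: c) =
      ((pvSplit76 (c ++ s)).1.map (fun x => ';' :: ' ' :: x),
       ';' :: ' ' :: (pvSplit76 (c ++ s)).2) :=
  pvWhileA_eq_aux s.length s c le_rfl h

-- proof-side view of one formatted chunk and of B's parts list
def pvCmt0 (l : List Char) (cs : Int) (addr : Int) (i : Int) : List Char :=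
  "5AA5F382".toList ++ pvHex4 addr.toNat ++
    (PySem.List.slice l (some i) (some (i + cs)) ++
      List.replicate (cs - ((PySem.List.slice l (some i) (some (i + cs))).length : Int)).toNat '0')

def pvParts (l : List Char) (cs : Int) (addr : Int) : List Int → List (List Char)
  | [] => []
  | i :: is => pvCmt0 l cs addr i :: pvParts l cs (addr + 0x78) is

lemma pvPad_eq (chunk : List Char) (cs : Int) :
    (if ((chunk.length : Nat) : Int) < cs
     then chunk ++ List.replicate (cs - ((chunk.length : Nat) : Int)).toNat '0'
     else chunk) =
      chunk ++ List.replicate (cs - ((chunk.length : Nat) : Int)).toNat '0' := by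
  split_ifs with hlt
  · rfl
  · have hz : (cs - ((chunk.length : Nat) : Int)).toNat = 0 := by omega
    simp [hz]

lemma foldB_eq (l : List Char) (cs : Int) (is : List Int) (ps : List (List Char)) (addr : Int) :
    is.foldl (pvStepB l cs) (ps, addr) = (ps ++ pvParts l cs addr is, addr + 0x78 * is.length) := by
  induction is generalizing ps addr with
  | nil => simp [pvParts]
  | cons i is ih =>
      rw [List.foldl_cons]
      show List.foldl (pvStepB l cs) (ps ++ [pvCmt0 l cs addr i], addr + 0x78) is = _
      rw [ih, pvParts]
      simp only [Prod.mk.injEq]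
      refine ⟨by simp, by simp; push_cast; ring⟩

lemma foldA_eq (l : List Char) (cs : Int) (is : List Int) (g : List (List Char)) (c : List Char)
    (addr : Int) (h : c.length < 76) :
    is.foldl (pvStepA l cs) (g, ';' :: ' ' :: c, addr) =
      (g ++ ((pvSplit76 (c ++ (pvParts l cs addr is).flatten)).1).map (fun x => ';' :: ' ' :: x),
       ';' :: ' ' :: (pvSplit76 (c ++ (pvParts l cs addr is).flatten)).2,
       addr + 0x78 * is.length) := by
  induction is generalizing g c addr with
  | nil =>
      rw [List.foldl_nil]
      conv_rhs => rw [pvParts]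
      rw [List.flatten_nil, List.append_nil]
      conv_rhs => rw [pvSplit76]
      simp [h]
  | cons i is ih =>
      rw [List.foldl_cons]
      have hstep : pvStepA l cs (g, ';' :: ' ' :: c, addr) i =
          (g ++ ((pvSplit76 (c ++ pvCmt0 l cs addr i)).1).map (fun x => ';' :: ' ' :: x),
           ';' :: ' ' :: (pvSplit76 (c ++ pvCmt0 l cs addr i)).2, addr + 0x78) := by
        show (g ++ (pvWhileA _ (';' :: ' ' :: c)).1, (pvWhileA _ (';' :: ' ' :: c)).2, addr + 0x78) = _
        rw [pvPad_eq, pvWhileA_eq _ _ h]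
        simp [pvCmt0]
      rw [hstep, ih _ _ _ (pvSplit76_rem_lt _)]
      conv_rhs => rw [pvParts]
      rw [List.flatten_cons]
      have hsp := pvSplit76_append (c ++ pvCmt0 l cs addr i) (pvParts l cs (addr + 0x78) is).flatten
      rw [← List.append_assoc, hsp]
      simp only [List.map_append, List.append_assoc, List.length_cons, Prod.mk.injEq]
      refine ⟨trivial, trivial, by push_cast; ring⟩

lemma pvSlices_nat_aux (n : Nat) : ∀ (p : List Char), p.length ≤ n →
    (List.range (p.length / 76 + 1)).map (fun j => (p.drop (76 * j)).take 76) =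
      (pvSplit76 p).1 ++ [(pvSplit76 p).2] := by
  induction n with
  | zero =>
      intro p hp
      have : p.length = 0 := by omega
      rw [pvSplit76]
      simp [this, List.range_succ, Nat.div_eq_of_lt, List.take_of_length_le (by omega : p.length ≤ 76)]
  | succ n ih =>
      intro p hp
      by_cases hlt : p.length < 76
      · rw [pvSplit76, dif_pos hlt]
        simp [Nat.div_eq_of_lt hlt, List.range_succ, List.take_of_length_le (le_of_lt hlt)]
      · have hq : p.length / 76 = (p.drop 76).length / 76 + 1 := by
          rw [List.length_drop]; omega
        rw [hq, List.range_succ_eq_map, List.map_cons, List.map_map]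
        have h0 : (p.drop (76 * 0)).take 76 = p.take 76 := by simp
        have hstep : ∀ j : Nat, (p.drop (76 * (j + 1))).take 76 = ((p.drop 76).drop (76 * j)).take 76 := by
          intro j
          rw [List.drop_drop]
          congr 2
          ring
        have hmap : (List.range ((p.drop 76).length / 76 + 1)).map
              ((fun j => (p.drop (76 * j)).take 76) ∘ Nat.succ) =
            (List.range ((p.drop 76).length / 76 + 1)).map
              (fun j => ((p.drop 76).drop (76 * j)).take 76) := by
          refine List.map_congr_left ?_
          intro j _
          exact hstep j
        rw [h0, hmap, ih (p.drop 76) (by rw [List.length_drop]; omega)]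
        conv_rhs => rw [pvSplit76]
        rw [dif_neg hlt]
        simp

lemma pvSlices_nat (p : List Char) :
    (List.range (p.length / 76 + 1)).map (fun j => (p.drop (76 * j)).take 76) =
      (pvSplit76 p).1 ++ [(pvSplit76 p).2] :=
  pvSlices_nat_aux p.length p le_rfl

lemma pvSlices (p : List Char) :
    (PySem.List.pyRange 0 (PySem.Int.floordiv (p.length : Int) 76 + 1) 1).map
        (fun j => [';', ' '] ++ PySem.List.slice p (some (j * 76)) (some ((j + 1) * 76))) =
      ((pvSplit76 p).1 ++ [(pvSplit76 p).2]).map (fun x => ';' :: ' ' :: x) := by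
  have hfd : PySem.Int.floordiv ((p.length : Nat) : Int) 76 + 1 = ((p.length / 76 + 1 : Nat) : Int) := by
    rw [PySem.Int.floordiv_eq_ediv_of_pos (by norm_num)]
    omega
  rw [hfd, PySem.List.pyRange_zero_natCast, List.map_map]
  have hmap : (List.range (p.length / 76 + 1)).map
        ((fun j => [';', ' '] ++ PySem.List.slice p (some (j * 76)) (some ((j + 1) * 76))) ∘
          (fun k : Nat => (k : Int))) =
      (List.range (p.length / 76 + 1)).map
        (fun j => ';' :: ' ' :: ((p.drop (76 * j)).take 76)) := by
    refine List.map_congr_left ?_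
    intro j _
    have h1 : ((j : Int) * 76) = ((j * 76 : Nat) : Int) := by push_cast; ring
    have h2 : (((j : Int) + 1) * 76) = ((j * 76 + 76 : Nat) : Int) := by push_cast; ring
    simp only [Function.comp_apply, h1, h2, PySem.List.slice_natCast]
    have h3 : j * 76 + 76 - j * 76 = 76 := by omega
    rw [h3, Nat.mul_comm]
    rfl
  rw [hmap]
  have := pvSlices_nat p
  calc (List.range (p.length / 76 + 1)).map (fun j => ';' :: ' ' :: ((p.drop (76 * j)).take 76))
      = ((List.range (p.length / 76 + 1)).map (fun j => (p.drop (76 * j)).take 76)).map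
          (fun x => ';' :: ' ' :: x) := by rw [List.map_map]; rfl
    _ = ((pvSplit76 p).1 ++ [(pvSplit76 p).2]).map (fun x => ';' :: ' ' :: x) := by rw [this]

-- ===== VERDICT (by name: the statement is the Claim_ definition above) =====
theorem convertSnapshotToGcode_py_spec : Claim_equal_convertSnapshotToGcode_py := by
  intro es cs _ _
  unfold Spec_convertSnapshotToGcode_py
  simp only [convertSnapshotToGcode_py, convertSnapshotToGcode_py_alt]
  rw [foldA_eq es.toList cs _ _ [] 0x8000 (by simp)]
  rw [foldB_eq]
  simp only [List.nil_append]
  rw [pvSlices]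
  have hrem := pvSplit76_rem_lt ((pvParts es.toList cs 0x8000
    (PySem.List.pyRange 0 ((es.toList.length : Nat) : Int) cs)).flatten)
  rw [if_pos ⟨by simp only [List.length_cons]; omega, by simp⟩]
  simp [List.map_append]
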